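-- pv_equiv track=rewrite | github.com/PaperBackPear3/wardle_helper | wordleSolver.py | create_characters_utility_dict
-- ===== SOURCE A (Python) =====
-- def create_characters_utility_dict(characters_weight_list,word:str):
--     characters_utility = dict()
--     for index,character in enumerate(word):
--         if character not in characters_utility:
--             characters_utility[character] = [characters_weight_list[index]]
--         else:
--             characters_utility[character].append(characters_weight_list[index])
--     convert_missing_to_wrong_position(characters_utility)
--     return characters_utility
--
-- def convert_missing_to_wrong_position(characters_utility:dict):
--     for character in characters_utility:
--         for index,weight in enumerate(characters_utility[character]):
--             if weight == 0 and len(characters_utility[character])>1 and index != 0: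
--                 characters_utility[character][index] = 3
--     return characters_utility
-- ===== SOURCE B (Python) =====
-- def create_characters_utility_dict(characters_weight_list, word: str):
--     # For each distinct character (in first-occurrence order), collect the
--     # weights at all of its positions in one scan of the word; weights after
--     # the first occurrence that are 0 become 3.
--     result = {}
--     for character in word:
--         if character in result:
--             continue
--         group = [characters_weight_list[i] for i, c in enumerate(word) if c == character]
--         result[character] = group[:1] + [3 if w == 0 else w for w in group[1:]]
--     return result
-- ===== Notes on version B (the rewrite author's own statement) =====
-- stated objective: alternative
-- what changed: Instead of A's dict-building pass over positions followed by a second nested pass rescanning every group to turn non-first zeros into 3, B loops over distinct characters and, per new character, collects its whole group in one scan of the word, applying the zero-to-3 adjustment while building it.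
import Mathlib
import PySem

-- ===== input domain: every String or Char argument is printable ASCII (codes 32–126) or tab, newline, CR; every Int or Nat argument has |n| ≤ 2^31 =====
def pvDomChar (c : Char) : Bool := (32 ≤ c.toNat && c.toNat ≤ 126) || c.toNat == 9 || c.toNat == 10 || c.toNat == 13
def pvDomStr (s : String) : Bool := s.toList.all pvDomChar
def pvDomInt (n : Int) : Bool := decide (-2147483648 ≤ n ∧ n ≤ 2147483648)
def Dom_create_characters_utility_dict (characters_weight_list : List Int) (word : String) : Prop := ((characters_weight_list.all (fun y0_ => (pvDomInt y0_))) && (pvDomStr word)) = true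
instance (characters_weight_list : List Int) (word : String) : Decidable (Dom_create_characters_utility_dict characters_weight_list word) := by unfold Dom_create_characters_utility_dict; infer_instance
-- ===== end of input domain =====

-- B replaces A's dict-building pass plus second rescanning pass by a per-distinct-character scan of
-- the whole word that builds each (already adjusted) group directly; equivalence of return values on
-- words no longer than the weight list (objective: alternative decomposition, not faster).

-- ===== PORT A =====
-- loop body of A's first pass: group the weight at each position under its character
def pvStepA (characters_weight_list : List Int) (d : PySem.Dict String (List Int)) (p : Int × Char) : PySem.Dict String (List Int) :=
  if ¬ d.contains (String.ofList [p.2]) then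
    d.insert (String.ofList [p.2]) [PySem.List.pyGetD characters_weight_list p.1 0]
  else
    d.modify (String.ofList [p.2]) [] (fun v => v ++ [PySem.List.pyGetD characters_weight_list p.1 0])

-- A's convert_missing_to_wrong_position, applied to one value list (in-place index update rendered as a positional map)
def pvConvertA (v : List Int) : List Int :=
  (PySem.List.enumerate v).map (fun p => if p.2 = 0 ∧ v.length > 1 ∧ p.1 ≠ 0 then 3 else p.2)

def create_characters_utility_dict (characters_weight_list : List Int) (word : String) : List (String × List Int) :=
  let d := (PySem.List.enumerate word.toList).foldl (pvStepA characters_weight_list) PySem.Dict.empty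
  (d.items.map (fun p => (p.1, pvConvertA p.2)))

-- ===== PORT B =====
-- B's adjustment of one collected group: group[:1] + [3 if w == 0 else w for w in group[1:]]
def pvAdj : List Int → List Int
  | [] => []
  | h :: t => h :: t.map (fun w => if w = 0 then 3 else w)

-- B's loop body: skip characters already seen, otherwise collect that character's weights from the whole word
def pvStepB (full : List (Int × Char)) (characters_weight_list : List Int)
    (acc : List (String × List Int)) (p : Int × Char) : List (String × List Int) :=
  if acc.any (fun q => q.1 == String.ofList [p.2]) then acc
  else acc ++ [(String.ofList [p.2],
        pvAdj ((full.filter (fun q => q.2 == p.2)).map (fun q => PySem.List.pyGetD characters_weight_list q.1 0)))]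

def create_characters_utility_dict_alt (characters_weight_list : List Int) (word : String) : List (String × List Int) :=
  let full := PySem.List.enumerate word.toList
  full.foldl (pvStepB full characters_weight_list) []

-- ===== PRECONDITION & SPEC =====
-- A (and B) raise IndexError when the word is longer than the weight list; exactly those inputs are excluded.
def Pre_create_characters_utility_dict (characters_weight_list : List Int) (word : String) : Prop :=
  word.toList.length ≤ characters_weight_list.length
instance (characters_weight_list : List Int) (word : String) : Decidable (Pre_create_characters_utility_dict characters_weight_list word) := by unfold Pre_create_characters_utility_dict; infer_instance
def pvWitness_create_characters_utility_dict : List Int × String := ([1, 0, 0], "aba")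

def Spec_create_characters_utility_dict (characters_weight_list : List Int) (word : String) (out : List (String × List Int)) : Prop := out = create_characters_utility_dict_alt characters_weight_list word
instance (characters_weight_list : List Int) (word : String) (out : List (String × List Int)) : Decidable (Spec_create_characters_utility_dict characters_weight_list word out) := by unfold Spec_create_characters_utility_dict; infer_instance

-- ===== CLAIM (what is proved, stated in full; the proofs are below) =====
def Claim_equal_create_characters_utility_dict : Prop := ∀ (characters_weight_list : List Int) (word : String), Dom_create_characters_utility_dict characters_weight_list word → Pre_create_characters_utility_dict characters_weight_list word → Spec_create_characters_utility_dict characters_weight_list word (create_characters_utility_dict characters_weight_list word)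

-- ===== LEMMAS AND PROOFS =====

-- weight looked up for one stream element
def pvWt (ws : List Int) (p : Int × Char) : Int := PySem.List.pyGetD ws p.1 0

-- first-occurrence grouping of a stream of (index, char) pairs
def pvGroup (ws : List Int) : List (Int × Char) → List (String × List Int)
  | [] => []
  | p :: r =>
      (String.ofList [p.2], pvWt ws p :: (r.filter (fun q => q.2 == p.2)).map (pvWt ws))
        :: pvGroup ws (r.filter (fun q => ¬ (q.2 == p.2)))
  termination_by s => s.length
  decreasing_by
    simp only [List.length_cons, List.length_unattach]
    exact Nat.lt_succ_of_le (le_trans (List.length_filter_le _ _) (by simp))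

theorem pvKey_inj (a b : Char) : (String.ofList [a] = String.ofList [b]) ↔ a = b := by
  constructor
  · intro h
    have := congrArg String.toList h
    simpa using this
  · intro h; rw [h]

theorem pvKey_beq (a b : Char) : (String.ofList [a] == String.ofList [b]) = (a == b) := by
  by_cases h : a = b
  · simp [h]
  · have : ¬ (String.ofList [a] = String.ofList [b]) := fun hc => h ((pvKey_inj a b).mp hc)
    simp [h, this]

theorem pvConvertA_eq_pvAdj (v : List Int) : pvConvertA v = pvAdj v := by
  cases v with
  | nil => rfl
  | cons h t =>
    simp only [pvConvertA, pvAdj, PySem.List.enumerate_cons, List.map_cons]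
    congr 1
    · simp
    · cases t with
      | nil => rfl
      | cons h' t' =>
        have key : ∀ (t : List Int) (s : Int), 1 ≤ s →
            (PySem.List.enumerate t s).map
              (fun p => if p.2 = 0 ∧ (h :: h' :: t').length > 1 ∧ p.1 ≠ 0 then 3 else p.2)
              = t.map (fun w => if w = 0 then 3 else w) := by
          intro t
          induction t with
          | nil => intro s _; rfl
          | cons x xs ih =>
            intro s hs
            simp only [PySem.List.enumerate_cons, List.map_cons, ih (s+1) (by omega)]
            have hs0 : s ≠ 0 := by omega
            simp [hs0]
        exact key (h' :: t') 1 le_rfl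

-- under Nodup keys, replacing the first-matching value pointwise
theorem map_replace_pointwise (L : List (String × List Int)) (k : String) (w : List Int)
    (h : (L.map Prod.fst).Nodup) :
    L.map (fun r => if r.1 == k then (k, (PySem.Dict.mk L).getD k [] ++ w) else r)
      = L.map (fun r => if r.1 == k then (r.1, r.2 ++ w) else r) := by
  induction L with
  | nil => rfl
  | cons a L ih =>
    obtain ⟨k0, v0⟩ := a
    simp only [List.map_cons, List.nodup_cons] at h
    by_cases ha : k0 = k
    · subst ha
      have hrest : ∀ r ∈ L, ¬ (r.1 = k0) := by
        intro r hr hrk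
        exact h.1 (by rw [← hrk]; exact List.mem_map_of_mem hr)
      have hgetD : (PySem.Dict.mk ((k0, v0) :: L)).getD k0 [] = v0 := by
        simp [PySem.Dict.getD_eq_get?_getD, PySem.Dict.get?_mk_cons]
      simp only [List.map_cons, hgetD]
      simp only [beq_self_eq_true, if_pos]
      congr 1
      apply List.map_congr_left
      intro r hr
      simp [hrest r hr]
    · have hgetD : (PySem.Dict.mk ((k0, v0) :: L)).getD k [] = (PySem.Dict.mk L).getD k [] := by
        simp [PySem.Dict.getD_eq_get?_getD, PySem.Dict.get?_mk_cons, ha]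
      simp only [List.map_cons, hgetD, ha]
      rw [ih h.2]
      simp [ha]

-- A's grouping loop, characterised: existing entries get their later weights appended,
-- fresh characters are grouped in first-occurrence order
theorem foldA (ws : List Int) (s : List (Int × Char)) :
    ∀ (L : List (String × List Int)), (L.map Prod.fst).Nodup →
      (s.foldl (pvStepA ws) (PySem.Dict.mk L)).items
        = L.map (fun r => (r.1, r.2 ++ (s.filter (fun p => String.ofList [p.2] == r.1)).map (pvWt ws)))
          ++ pvGroup ws (s.filter (fun p => ¬ L.any (fun r => r.1 == String.ofList [p.2]))) := by
  induction s with
  | nil =>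
    intro L _
    simp [pvGroup]
  | cons p s ih =>
    intro L hN
    by_cases hc : (PySem.Dict.mk L).contains (String.ofList [p.2])
    · -- character already present: append its weight to the matching entry
      have hA : pvStepA ws (PySem.Dict.mk L) p
          = PySem.Dict.mk (L.map (fun r => if r.1 == String.ofList [p.2] then (r.1, r.2 ++ [pvWt ws p]) else r)) := by
        rw [show (L.map (fun r => if r.1 == String.ofList [p.2] then (r.1, r.2 ++ [pvWt ws p]) else r))
              = L.map (fun r => if r.1 == String.ofList [p.2] then (String.ofList [p.2], (PySem.Dict.mk L).getD (String.ofList [p.2]) [] ++ [pvWt ws p]) else r) from by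
          rw [map_replace_pointwise L _ [pvWt ws p] hN]]
        simp [pvStepA, PySem.Dict.modify, PySem.Dict.insert, hc, pvWt]
      have hfst : (L.map (fun r => if r.1 == String.ofList [p.2] then (r.1, r.2 ++ [pvWt ws p]) else r)).map Prod.fst
          = L.map Prod.fst := by
        rw [List.map_map]; apply List.map_congr_left; intro r _
        by_cases h : r.1 = String.ofList [p.2] <;> simp [h]
      have hNod : ((L.map (fun r => if r.1 == String.ofList [p.2] then (r.1, r.2 ++ [pvWt ws p]) else r)).map Prod.fst).Nodup := by
        rw [hfst]; exact hN
      rw [List.foldl_cons, hA, ih _ hNod]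
      congr 1
      · -- the per-entry map parts agree
        rw [List.map_map]
        apply List.map_congr_left
        intro r _
        by_cases h : r.1 = String.ofList [p.2]
        · simp [Function.comp, h, List.filter_cons, List.append_assoc]
        · have h' : ¬ (String.ofList [p.2] = r.1) := fun hc => h hc.symm
          simp [Function.comp, h, List.filter_cons, h']
      · -- the fresh-character streams agree
        congr 1
        have hcL : L.any (fun r => r.1 == String.ofList [p.2]) = true := by
          simpa [PySem.Dict.contains] using hc
        rw [List.filter_cons]
        simp only [hcL, not_true, decide_false]
        apply List.filter_congr
        intro x _
        have hany : (L.map (fun r => if r.1 == String.ofList [p.2] then (r.1, r.2 ++ [pvWt ws p]) else r)).any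
              (fun r => r.1 == String.ofList [x.2]) = L.any (fun r => r.1 == String.ofList [x.2]) := by
          rw [List.any_map]
          apply List.any_congr rfl
          intro r
          by_cases h : r.1 = String.ofList [p.2] <;> simp [Function.comp, h]
        rw [hany]
    · -- fresh character: appended at the end, becomes head of the new groups
      have hcL : L.any (fun r => r.1 == String.ofList [p.2]) = false := by
        have := hc
        simp only [PySem.Dict.contains] at this
        exact Bool.eq_false_iff.mpr this
      have hfresh : ∀ r ∈ L, ¬ (r.1 = String.ofList [p.2]) := by
        intro r hr hrk
        have := List.any_eq_false.mp hcL r hr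
        simp [hrk] at this
      have hcf : (PySem.Dict.mk L).contains (String.ofList [p.2]) = false :=
        Bool.eq_false_iff.mpr hc
      have hA : pvStepA ws (PySem.Dict.mk L) p
          = PySem.Dict.mk (L ++ [(String.ofList [p.2], [pvWt ws p])]) := by
        simp [pvStepA, PySem.Dict.insert, hcf, pvWt]
      have hNod : ((L ++ [(String.ofList [p.2], [pvWt ws p])]).map Prod.fst).Nodup := by
        simp only [List.map_append, List.map_cons, List.map_nil]
        rw [List.nodup_append]
        refine ⟨hN, List.nodup_singleton _, ?_⟩
        intro a ha b hb
        simp only [List.mem_singleton] at hb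
        subst hb
        rcases List.mem_map.mp ha with ⟨r, hr, hre⟩
        intro hab
        exact hfresh r hr (by rw [← hre] at hab; exact hab)
      rw [List.foldl_cons, hA, ih _ hNod]
      rw [List.map_append]
      simp only [List.map_cons, List.map_nil]
      rw [List.append_assoc]
      congr 1
      · -- old entries: p contributes nothing to them
        apply List.map_congr_left
        intro r hr
        rw [List.filter_cons]
        have : (String.ofList [p.2] == r.1) = false := by
          simp only [beq_eq_false_iff_ne, ne_eq]
          intro h; exact hfresh r hr h.symm
        simp [this]
      · -- new entry is the head group of the remaining fresh stream
        have hpass : (p :: s).filter (fun x => ¬ L.any (fun r => r.1 == String.ofList [x.2]))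
            = p :: s.filter (fun x => ¬ L.any (fun r => r.1 == String.ofList [x.2])) := by
          rw [List.filter_cons]
          simp [hcL]
        rw [hpass, pvGroup]
        have hval : List.filter (fun q => String.ofList [q.2] == String.ofList [p.2]) s
            = List.filter (fun q => q.2 == p.2)
                (List.filter (fun x => ¬ L.any (fun r => r.1 == String.ofList [x.2])) s) := by
          rw [List.filter_filter]
          apply List.filter_congr
          intro x _
          by_cases hx : x.2 = p.2
          · have h1 : (String.ofList [x.2] == String.ofList [p.2]) = true := by
              rw [pvKey_beq]; simp [hx]
            have hxc : (L.any fun r => r.1 == String.ofList [x.2]) = false := by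
              rw [hx]; exact hcL
            simp only [h1, hx, hxc]
            simp
            exact fun a b hab h => hfresh (a, b) hab h
          · have h1 : (String.ofList [x.2] == String.ofList [p.2]) = false := by
              rw [pvKey_beq]; simp [hx]
            simp [h1, hx]
        have hrest2 : List.filter (fun x => ¬ (L ++ [(String.ofList [p.2], [pvWt ws p])]).any
              (fun r => r.1 == String.ofList [x.2])) s
            = List.filter (fun q => ¬ (q.2 == p.2))
                (List.filter (fun x => ¬ L.any (fun r => r.1 == String.ofList [x.2])) s) := by
          rw [List.filter_filter]
          apply List.filter_congr
          intro x _
          simp only [List.any_append, List.any_cons, List.any_nil, Bool.or_false]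
          by_cases hx : x.2 = p.2
          · have h1 : (String.ofList [p.2] == String.ofList [x.2]) = true := by
              rw [pvKey_beq]; simp [hx]
            simp [h1, hx]
          · have h1 : (String.ofList [p.2] == String.ofList [x.2]) = false := by
              rw [pvKey_beq]; exact beq_eq_false_iff_ne.mpr (fun h => hx h.symm)
            simp [h1, hx]
        rw [hval, hrest2]
        simp
  termination_by s.length

-- B's loop, characterised: it appends, in first-occurrence order, each unseen character with its
-- adjusted whole-stream group
theorem foldB (ws : List Int) (full : List (Int × Char)) :
    ∀ (s pre : List (Int × Char)) (acc : List (String × List Int)),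
      full = pre ++ s →
      (∀ p ∈ pre, acc.any (fun r => r.1 == String.ofList [p.2]) = true) →
      s.foldl (pvStepB full ws) acc
        = acc ++ (pvGroup ws (s.filter (fun p => ¬ acc.any (fun r => r.1 == String.ofList [p.2])))).map
            (fun r => (r.1, pvAdj r.2)) := by
  intro s
  induction s with
  | nil => intro pre acc _ _; simp [pvGroup]
  | cons p s ih =>
    intro pre acc hfull hpre
    rw [List.foldl_cons]
    by_cases hseen : acc.any (fun r => r.1 == String.ofList [p.2]) = true
    · -- character already seen: the loop body skips it
      have hstep : pvStepB full ws acc p = acc := by simp [pvStepB, hseen]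
      rw [hstep]
      have hfull' : full = (pre ++ [p]) ++ s := by rw [hfull]; simp
      have hpre' : ∀ q ∈ pre ++ [p], acc.any (fun r => r.1 == String.ofList [q.2]) = true := by
        intro q hq
        rcases List.mem_append.mp hq with h | h
        · exact hpre q h
        · simp only [List.mem_singleton] at h; subst h; exact hseen
      rw [ih (pre ++ [p]) acc hfull' hpre']
      congr 2
      rw [List.filter_cons]
      simp [hseen]
    · -- new character: its whole-stream group is exactly p plus its later occurrences
      have hkval : full.filter (fun q => q.2 == p.2) = p :: s.filter (fun q => q.2 == p.2) := by
        rw [hfull, List.filter_append, List.filter_cons]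
        have hprenil : pre.filter (fun q => q.2 == p.2) = [] := by
          rw [List.filter_eq_nil_iff]
          intro q hq hq2
          have hkey : String.ofList [q.2] = String.ofList [p.2] := by
            rw [pvKey_inj]; exact eq_of_beq hq2
          have hq3 := hpre q hq
          rw [hkey] at hq3
          exact hseen hq3
        simp [hprenil]
      have hstep : pvStepB full ws acc p
          = acc ++ [(String.ofList [p.2],
              pvAdj (pvWt ws p :: (s.filter (fun q => q.2 == p.2)).map (pvWt ws)))] := by
        simp [pvStepB, hseen, hkval, pvWt]
        rfl
      set acc' := acc ++ [(String.ofList [p.2],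
          pvAdj (pvWt ws p :: (s.filter (fun q => q.2 == p.2)).map (pvWt ws)))] with hacc'
      have hfull' : full = (pre ++ [p]) ++ s := by rw [hfull]; simp
      have hpre' : ∀ q ∈ pre ++ [p], acc'.any (fun r => r.1 == String.ofList [q.2]) = true := by
        intro q hq
        rcases List.mem_append.mp hq with h | h
        · have := hpre q h
          simp [hacc', List.any_append, this]
        · simp only [List.mem_singleton] at h; subst h
          simp [hacc', List.any_append]
      rw [hstep, ih (pre ++ [p]) acc' hfull' hpre']
      have hpass : (p :: s).filter (fun x => ¬ acc.any (fun r => r.1 == String.ofList [x.2]))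
          = p :: s.filter (fun x => ¬ acc.any (fun r => r.1 == String.ofList [x.2])) := by
        rw [List.filter_cons]
        simp [hseen]
      rw [hpass, pvGroup]
      have haccf : (acc.any fun r => r.1 == String.ofList [p.2]) = false := Bool.eq_false_iff.mpr hseen
      have hfreshB : ∀ r ∈ acc, ¬ r.1 = String.ofList [p.2] := by
        intro r hr hrk
        have h2 := List.any_eq_false.mp haccf r hr
        simp [hrk] at h2
      have hval2 : (s.filter (fun x => ¬ acc.any (fun r => r.1 == String.ofList [x.2]))).filter
            (fun q => q.2 == p.2)
          = s.filter (fun q => q.2 == p.2) := by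
        rw [List.filter_filter]
        apply List.filter_congr
        intro x _
        by_cases hx : x.2 = p.2
        · have hxa : acc.any (fun r => r.1 == String.ofList [x.2]) = false := by
            rw [hx]; exact Bool.eq_false_iff.mpr hseen
          simp [hx, hxa]
          exact fun a b hab h => hfreshB (a, b) hab h
        · simp [hx]
      have hrest2 : s.filter (fun x => ¬ acc'.any (fun r => r.1 == String.ofList [x.2]))
          = (s.filter (fun x => ¬ acc.any (fun r => r.1 == String.ofList [x.2]))).filter
              (fun q => ¬ (q.2 == p.2)) := by
        rw [List.filter_filter]
        apply List.filter_congr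
        intro x _
        simp only [hacc', List.any_append, List.any_cons, List.any_nil, Bool.or_false]
        by_cases hx : x.2 = p.2
        · have h1 : (String.ofList [p.2] == String.ofList [x.2]) = true := by
            rw [pvKey_beq]; simp [hx]
          simp [h1, hx]
        · have h1 : (String.ofList [p.2] == String.ofList [x.2]) = false := by
            rw [pvKey_beq]; exact beq_eq_false_iff_ne.mpr (fun h => hx h.symm)
          simp [h1, hx]
      rw [hval2, hrest2]
      simp [hacc']

-- ===== VERDICT (by name: the statement is the Claim_ definition above) =====
theorem create_characters_utility_dict_spec : Claim_equal_create_characters_utility_dict := by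
  intro ws word _ _
  unfold Spec_create_characters_utility_dict
  unfold create_characters_utility_dict create_characters_utility_dict_alt
  have hA := foldA ws (PySem.List.enumerate word.toList) [] (by simp)
  have hB := foldB ws (PySem.List.enumerate word.toList) (PySem.List.enumerate word.toList) [] []
    rfl (by intro q hq; simp at hq)
  simp only [List.map_nil, List.nil_append, List.any_nil, Bool.not_false, List.filter_true,
    not_false_eq_true, decide_true] at hA hB
  show (((PySem.List.enumerate word.toList).foldl (pvStepA ws) (PySem.Dict.mk [])).items.map
      (fun p => (p.1, pvConvertA p.2)))
    = (PySem.List.enumerate word.toList).foldl (pvStepB (PySem.List.enumerate word.toList) ws) []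
  rw [hA, hB]
  apply List.map_congr_left
  intro r _
  rw [pvConvertA_eq_pvAdj]
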